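-- pv_equiv track=rewrite | github.com/chipsalliance/i3c-core | verification/cocotb/common/utils.py | format_ibi_data
-- ===== SOURCE A (Python) =====
-- def format_ibi_data(mdb, data):
--     """
--     Given MDB and a list of data bytes (can be empty) prepare a sequence of
--     32-bit words to be written to the TTI IBI queue.
--     """
--     count = (len(data) + 3) // 4
--     words = [0 for i in range(count)]
--
--     i = 0
--     j = 0
--     for d in data:
--         words[j] |= d << (8 * i)
--
--         i = i + 1
--         if i == 4:
--             i = 0
--             j = j + 1
--
--     descr = (mdb << 24) | len(data)
--     return [descr] + words
-- ===== SOURCE B (Python) =====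
-- def format_ibi_data(mdb, data):
--     """
--     Given MDB and a list of data bytes (can be empty) prepare a sequence of
--     32-bit words to be written to the TTI IBI queue.
--     """
--     def pack(chunk):
--         acc = 0
--         for i, d in enumerate(chunk):
--             acc |= d << (8 * i)
--         return acc
--
--     words = []
--     k = 0
--     while k < len(data):
--         words.append(pack(data[k:k+4]))
--         k += 4
--     return [(mdb << 24) | len(data)] + words
-- ===== Notes on version B (the rewrite author's own statement) =====
-- stated objective: idiomatic
-- what changed: B drops A's preallocated zero word array and rolling i/j counters: it slices the data into 4-byte chunks and packs each chunk independently with an enumerate-based OR fold, appending one finished word per chunk.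
import Mathlib
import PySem

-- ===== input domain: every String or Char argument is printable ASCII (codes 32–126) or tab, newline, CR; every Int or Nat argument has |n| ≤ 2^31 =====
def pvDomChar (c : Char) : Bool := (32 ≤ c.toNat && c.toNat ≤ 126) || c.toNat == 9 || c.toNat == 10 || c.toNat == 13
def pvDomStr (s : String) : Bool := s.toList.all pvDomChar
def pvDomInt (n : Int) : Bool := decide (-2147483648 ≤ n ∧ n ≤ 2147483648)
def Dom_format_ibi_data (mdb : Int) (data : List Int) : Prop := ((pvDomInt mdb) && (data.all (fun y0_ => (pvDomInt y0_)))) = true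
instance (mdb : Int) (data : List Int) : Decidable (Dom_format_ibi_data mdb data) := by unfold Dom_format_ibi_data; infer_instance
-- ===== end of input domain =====

-- B packs the data by 4-byte slices, each chunk folded into a word independently,
-- instead of A's preallocated word array updated through rolling i/j counters (objective: idiomatic).

-- ===== PORT A =====
-- A's for-loop over data with state (words, i, j); words[j] |= d << (8*i) is
-- List.modify (j is always in range since words has ⌈len/4⌉ entries).
def pvLoopA : List Int → Nat → Nat → List Int → List Int
  | words, _, _, [] => words
  | words, i, j, d :: rest =>
      let words' := words.modify j (fun w => PySem.Int.bor w (d <<< (8 * i)))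
      if i + 1 = 4 then pvLoopA words' 0 (j + 1) rest else pvLoopA words' (i + 1) j rest

def format_ibi_data (mdb : Int) (data : List Int) : List Int :=
  let count := (data.length + 3) / 4      -- Python // on nonnegative ints = Nat division
  let words := List.replicate count (0 : Int)
  let words := pvLoopA words 0 0 data
  let descr := PySem.Int.bor (mdb <<< 24) (data.length : Int)
  [descr] ++ words

-- ===== PORT B =====
-- B's pack(chunk): acc |= d << 8*k over enumerate(chunk)
def pvPackB (chunk : List Int) : Int :=
  chunk.zipIdx.foldl (fun (acc : Int) (p : Int × Nat) => PySem.Int.bor acc (p.1 <<< (8 * p.2))) 0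

-- B's while-loop over index k (k += 4), each step packing the slice data[k:k+4]
def pvWordsB (data : List Int) (k : Nat) : List Int :=
  if k < data.length then
    pvPackB (PySem.List.slice data (some (k : Int)) (some ((k : Int) + 4))) :: pvWordsB data (k + 4)
  else []
  termination_by data.length - k

def format_ibi_data_alt (mdb : Int) (data : List Int) : List Int :=
  [PySem.Int.bor (mdb <<< 24) (data.length : Int)] ++ pvWordsB data 0

-- ===== PRECONDITION & SPEC =====
def Spec_format_ibi_data (mdb : Int) (data : List Int) (out : List Int) : Prop := out = format_ibi_data_alt mdb data
instance (mdb : Int) (data : List Int) (out : List Int) : Decidable (Spec_format_ibi_data mdb data out) := by unfold Spec_format_ibi_data; infer_instance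

-- ===== CLAIM (what is proved, stated in full; the proofs are below) =====
def Claim_equal_format_ibi_data : Prop := ∀ (mdb : Int) (data : List Int), Dom_format_ibi_data mdb data → Spec_format_ibi_data mdb data (format_ibi_data mdb data)

-- ===== LEMMAS AND PROOFS =====

-- A's pack expressed as a recursion with a running accumulator and bit offset
def pvPackFrom (acc : Int) (i : Nat) : List Int → Int
  | [] => acc
  | d :: rest => pvPackFrom (PySem.Int.bor acc (d <<< (8 * i))) (i + 1) rest

theorem pvPackFrom_eq_fold (l : List Int) (acc : Int) (i : Nat) :
    pvPackFrom acc i l = (l.zipIdx i).foldl (fun (acc : Int) (p : Int × Nat) => PySem.Int.bor acc (p.1 <<< (8 * p.2))) acc := by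
  induction l generalizing acc i with
  | nil => rfl
  | cons d rest ih => simp [pvPackFrom, List.zipIdx_cons, ih]

theorem pvLoopA_skip (data : List Int) (w : Int) (ws : List Int) (i j : Nat) :
    pvLoopA (w :: ws) i (j + 1) data = w :: pvLoopA ws i j data := by
  induction data generalizing w ws i j with
  | nil => rfl
  | cons d rest ih =>
      have hm : ∀ f : Int → Int, (w :: ws).modify (j + 1) f = w :: ws.modify j f := by
        intro f; simp
      simp only [pvLoopA, hm]
      split
      all_goals exact ih ..

theorem pvLoopA_head (data : List Int) (acc : Int) (ws : List Int) (i : Nat) (hi : i ≤ 3) :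
    pvLoopA (acc :: ws) i 0 data =
      pvPackFrom acc i (data.take (4 - i)) :: pvLoopA ws 0 0 (data.drop (4 - i)) := by
  induction data generalizing acc i with
  | nil => simp [pvLoopA, pvPackFrom]
  | cons d rest ih =>
      have hm : ∀ f : Int → Int, (acc :: ws).modify 0 f = f acc :: ws := fun f => rfl
      simp only [pvLoopA, hm]
      by_cases h4 : i + 1 = 4
      · have hi3 : i = 3 := by omega
        subst hi3
        rw [if_pos rfl]
        simp [pvLoopA_skip, pvPackFrom]
      · rw [if_neg h4, ih _ (i + 1) (by omega)]
        have ht : (d :: rest).take (4 - i) = d :: rest.take (4 - (i + 1)) := by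
          have h : 4 - i = (4 - (i + 1)) + 1 := by omega
          simp [h]
        have hd : (d :: rest).drop (4 - i) = rest.drop (4 - (i + 1)) := by
          have h : 4 - i = (4 - (i + 1)) + 1 := by omega
          simp [h]
        rw [ht, hd]
        rfl

-- proof-side chunked view of the data
def pvChunks : List Int → List Int
  | [] => []
  | d :: rest => pvPackB ((d :: rest).take 4) :: pvChunks ((d :: rest).drop 4)
  termination_by l => l.length
  decreasing_by simp

theorem pvWordsB_eq_chunks : ∀ (fuel : Nat) (data : List Int) (k : Nat), data.length - k ≤ fuel →
    pvWordsB data k = pvChunks (data.drop k) := by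
  intro fuel
  induction fuel with
  | zero =>
      intro data k h
      have hk : data.length ≤ k := by omega
      rw [pvWordsB, if_neg (by omega)]
      rw [List.drop_eq_nil_of_le hk]
      rw [pvChunks]
  | succ n ih =>
      intro data k h
      by_cases hk : k < data.length
      · rw [pvWordsB, if_pos hk]
        have hne : data.drop k ≠ [] := by
          simp only [ne_eq, List.drop_eq_nil_iff]; omega
        obtain ⟨d, rest, hdr⟩ := List.exists_cons_of_ne_nil hne
        have hslice : PySem.List.slice data (some (k : Int)) (some ((k : Int) + 4))
            = (data.drop k).take 4 := by
          have := PySem.List.slice_natCast_add (xs := data) (j := k) (n := 4)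
          simpa using this
        have hdrop4 : data.drop (k + 4) = (data.drop k).drop 4 := by
          rw [List.drop_drop]
        rw [hslice, ih data (k + 4) (by omega), hdrop4, hdr]
        conv_rhs => rw [pvChunks]
      · rw [pvWordsB, if_neg hk]
        rw [List.drop_eq_nil_of_le (by omega)]
        rw [pvChunks]

theorem pvLoopA_eq_chunks_aux : ∀ (n : Nat) (data : List Int), data.length ≤ n →
    pvLoopA (List.replicate ((data.length + 3) / 4) 0) 0 0 data = pvChunks data := by
  intro n
  induction n with
  | zero =>
      intro data h
      have hdata : data = [] := by
        cases data with
        | nil => rfl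
        | cons d rest => simp at h
      subst hdata; rw [pvChunks]; rfl
  | succ n ih =>
      intro data h
      cases data with
      | nil => rw [pvChunks]; rfl
      | cons d rest =>
          have hcount : ((d :: rest).length + 3) / 4 = ((rest.drop 3).length + 3) / 4 + 1 := by
            simp only [List.length_cons, List.length_drop]
            omega
          rw [hcount, List.replicate_succ, pvLoopA_head _ _ _ 0 (by omega)]
          have hdrop : (d :: rest).drop (4 - 0) = rest.drop 3 := by simp
          rw [hdrop, ih (rest.drop 3) (by simp at h ⊢; omega)]
          conv_rhs => rw [pvChunks]
          rw [pvPackFrom_eq_fold]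
          simp [pvPackB]

theorem pvLoopA_eq_wordsB (data : List Int) :
    pvLoopA (List.replicate ((data.length + 3) / 4) 0) 0 0 data = pvWordsB data 0 := by
  rw [pvWordsB_eq_chunks data.length data 0 (by omega)]
  simpa using pvLoopA_eq_chunks_aux data.length data le_rfl

-- ===== VERDICT (by name: the statement is the Claim_ definition above) =====
theorem format_ibi_data_spec : Claim_equal_format_ibi_data := by
  intro mdb data _
  unfold Spec_format_ibi_data format_ibi_data format_ibi_data_alt
  simp only [pvLoopA_eq_wordsB]
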